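-- pv_equiv track=rewrite | github.com/x8-labs/x8 | x8/compute/container_deployment/providers/_amazon_ecs.py | _convert_fargate_cpu_memory
-- ===== SOURCE A (Python) =====
-- def _convert_fargate_cpu_memory(
--     cpu: int, memory: int
-- ) -> tuple[str, str]:
--     CONFIGS = {
--         256: [512, 1024, 2048],
--         512: [1024, 2048, 3072, 4096],
--         1024: [2048, 3072, 4096, 5120, 6144, 7168, 8192],
--         2048: list(range(4096, 16385, 1024)),
--         4096: list(range(8192, 30721, 1024)),
--         8192: list(range(16384, 61441, 4096)),  # requires platform 1.4.0+
--         16384: list(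
--             range(32768, 122881, 8192)
--         ),  # requires platform 1.4.0+
--     }
--
--     for cpu_val in sorted(CONFIGS):
--         if cpu <= cpu_val:
--             for mem in CONFIGS[cpu_val]:
--                 if memory <= mem:
--                     return str(cpu_val), str(mem)
--             raise ValueError(
--                 f"Memory {memory}MiB is too large for {cpu_val} CPU"
--             )
--
--     raise ValueError(f"Unsupported CPU value: {cpu}")
-- ===== SOURCE B (Python) =====
-- def _convert_fargate_cpu_memory(
--     cpu: int, memory: int
-- ) -> tuple[str, str]:
--     # (cpu tier, min memory, max memory, memory step): memory options of each
--     # tier are lo, then multiples of step up to hi, so the smallest admissible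
--     # memory is computed by ceiling division instead of scanning a list.
--     TIERS = [
--         (256, 512, 2048, 1024),
--         (512, 1024, 4096, 1024),
--         (1024, 2048, 8192, 1024),
--         (2048, 4096, 16384, 1024),
--         (4096, 8192, 30720, 1024),
--         (8192, 16384, 61440, 4096),
--         (16384, 32768, 122880, 8192),
--     ]
--     for cpu_val, lo, hi, step in TIERS:
--         if cpu <= cpu_val:
--             if memory > hi:
--                 raise ValueError(
--                     f"Memory {memory}MiB is too large for {cpu_val} CPU"
--                 )
--             mem = lo if memory <= lo else -(-memory // step) * step
--             return str(cpu_val), str(mem)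
--     raise ValueError(f"Unsupported CPU value: {cpu}")
-- ===== Notes on version B (the rewrite author's own statement) =====
-- stated objective: simpler
-- what changed: Replaces the inner linear scan over each tier's memory list with a ceiling-division formula over a 7-row (cpu, lo, hi, step) table: the smallest admissible memory is computed arithmetically instead of found by scanning.
import Mathlib
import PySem

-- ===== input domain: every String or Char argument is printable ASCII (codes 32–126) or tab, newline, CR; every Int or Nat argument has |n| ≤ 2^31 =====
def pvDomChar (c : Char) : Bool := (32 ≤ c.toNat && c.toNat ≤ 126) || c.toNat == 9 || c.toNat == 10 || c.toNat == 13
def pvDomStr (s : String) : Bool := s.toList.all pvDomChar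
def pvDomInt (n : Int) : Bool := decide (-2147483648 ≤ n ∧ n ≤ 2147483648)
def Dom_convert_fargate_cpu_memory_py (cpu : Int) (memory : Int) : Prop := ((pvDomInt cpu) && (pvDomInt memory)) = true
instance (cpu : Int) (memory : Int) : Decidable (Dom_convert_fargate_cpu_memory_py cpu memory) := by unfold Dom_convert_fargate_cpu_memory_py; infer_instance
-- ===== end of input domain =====

-- B replaces A's inner linear scan over each tier's memory list by a ceiling-division
-- formula over a (tier, lo, hi, step) table (objective: simpler); return values only —
-- where the Python raises ValueError both ports return ("","") and Pre_ excludes those inputs.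

-- ===== PORT A =====
-- the CONFIGS dict A builds on every call (a constant, hoisted as a helper)
def pyA_CONFIGS : PySem.Dict Int (List Int) :=
  PySem.Dict.ofList
    [ (256, [512, 1024, 2048]),
      (512, [1024, 2048, 3072, 4096]),
      (1024, [2048, 3072, 4096, 5120, 6144, 7168, 8192]),
      (2048, PySem.List.pyRange 4096 16385 1024),
      (4096, PySem.List.pyRange 8192 30721 1024),
      (8192, PySem.List.pyRange 16384 61441 4096),
      (16384, PySem.List.pyRange 32768 122881 8192) ]

-- inner 'for mem in CONFIGS[cpu_val]' loop; [] = the 'too large' ValueError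
def pyA_memLoop (cpu_val : Int) (mems : List Int) (memory : Int) : String × String :=
  match mems with
  | [] => ("", "")
  | m :: rest =>
      if memory ≤ m then (PySem.Int.toStr cpu_val, PySem.Int.toStr m)
      else pyA_memLoop cpu_val rest memory

-- outer 'for cpu_val in sorted(CONFIGS)' loop; [] = the 'Unsupported CPU' ValueError
def pyA_cpuLoop (keys : List Int) (cpu : Int) (memory : Int) : String × String :=
  match keys with
  | [] => ("", "")
  | k :: rest =>
      if cpu ≤ k then pyA_memLoop k (pyA_CONFIGS.getD k []) memory
      else pyA_cpuLoop rest cpu memory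

def convert_fargate_cpu_memory_py (cpu : Int) (memory : Int) : String × String :=
  pyA_cpuLoop (PySem.List.sorted pyA_CONFIGS.keys (fun k => k) false) cpu memory

-- ===== PORT B =====
def altTiers : List (Int × Int × Int × Int) :=
  [ (256, 512, 2048, 1024),
    (512, 1024, 4096, 1024),
    (1024, 2048, 8192, 1024),
    (2048, 4096, 16384, 1024),
    (4096, 8192, 30720, 1024),
    (8192, 16384, 61440, 4096),
    (16384, 32768, 122880, 8192) ]

-- 'for cpu_val, lo, hi, step in TIERS'; ("","") stands for the two ValueErrors
def altLoop (tiers : List (Int × Int × Int × Int)) (cpu : Int) (memory : Int) : String × String :=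
  match tiers with
  | [] => ("", "")
  | (cpu_val, lo, hi, step) :: rest =>
      if cpu ≤ cpu_val then
        if memory > hi then ("", "")
        else
          (PySem.Int.toStr cpu_val,
           PySem.Int.toStr (if memory ≤ lo then lo
                            else -(PySem.Int.floordiv (-memory) step) * step))
      else altLoop rest cpu memory

def convert_fargate_cpu_memory_py_alt (cpu : Int) (memory : Int) : String × String :=
  altLoop altTiers cpu memory

-- ===== PRECONDITION & SPEC =====
-- Pre_ excludes exactly the inputs on which A raises ValueError: cpu above the largest
-- tier, or memory above the largest memory option of the tier cpu selects.
def Pre_convert_fargate_cpu_memory_py (cpu : Int) (memory : Int) : Prop :=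
  cpu ≤ 16384 ∧
  (cpu ≤ 256 → memory ≤ 2048) ∧
  (cpu ≤ 512 → memory ≤ 4096) ∧
  (cpu ≤ 1024 → memory ≤ 8192) ∧
  (cpu ≤ 2048 → memory ≤ 16384) ∧
  (cpu ≤ 4096 → memory ≤ 30720) ∧
  (cpu ≤ 8192 → memory ≤ 61440) ∧
  memory ≤ 122880
instance (cpu : Int) (memory : Int) : Decidable (Pre_convert_fargate_cpu_memory_py cpu memory) := by
  unfold Pre_convert_fargate_cpu_memory_py; infer_instance

def pvWitness_convert_fargate_cpu_memory_py : Int × Int := (700, 5000)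

def Spec_convert_fargate_cpu_memory_py (cpu : Int) (memory : Int) (out : String × String) : Prop := out = convert_fargate_cpu_memory_py_alt cpu memory
instance (cpu : Int) (memory : Int) (out : String × String) : Decidable (Spec_convert_fargate_cpu_memory_py cpu memory out) := by unfold Spec_convert_fargate_cpu_memory_py; infer_instance

-- ===== CLAIM (what is proved, stated in full; the proofs are below) =====
def Claim_equal_convert_fargate_cpu_memory_py : Prop := ∀ (cpu : Int) (memory : Int), Dom_convert_fargate_cpu_memory_py cpu memory → Pre_convert_fargate_cpu_memory_py cpu memory → Spec_convert_fargate_cpu_memory_py cpu memory (convert_fargate_cpu_memory_py cpu memory)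

-- ===== LEMMAS AND PROOFS =====
set_option maxHeartbeats 1000000

-- the sorted key list A's outer loop walks
theorem pyA_sorted_keys :
    PySem.List.sorted pyA_CONFIGS.keys (fun k => k) false
      = [256, 512, 1024, 2048, 4096, 8192, 16384] := by decide

-- a, a+step, …, a+n*step (every tier's memory list except the 256 one has this shape)
def progList (a step : Int) : Nat → List Int
  | 0 => [a]
  | n + 1 => a :: progList (a + step) step n

-- A's inner scan over an arithmetic progression of multiples of step computes
-- exactly B's "lo or ceiling-division" formula.
theorem memLoop_prog (cv step : Int) (hstep : 0 < step) :
    ∀ (n : Nat) (a memory : Int), (∃ c, a = c * step) → memory ≤ a + n * step →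
      pyA_memLoop cv (progList a step n) memory
        = (PySem.Int.toStr cv,
           PySem.Int.toStr (if memory ≤ a then a
                            else -(PySem.Int.floordiv (-memory) step) * step)) := by
  intro n
  induction n with
  | zero =>
      intro a memory _ hub
      simp only [progList, pyA_memLoop]
      rw [if_pos (by omega), if_pos (by omega)]
  | succ n ih =>
      intro a memory hdvd hub
      obtain ⟨c, hc⟩ := hdvd
      simp only [progList, pyA_memLoop]
      by_cases hma : memory ≤ a
      · rw [if_pos hma, if_pos hma]
      · rw [if_neg hma, if_neg hma,
            ih (a + step) memory ⟨c + 1, by rw [hc]; ring⟩ (by push_cast at hub; linarith)]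
        by_cases hms : memory ≤ a + step
        · rw [if_pos hms]
          have hq : -(PySem.Int.floordiv (-memory) step) = c + 1 :=
            (PySem.Int.neg_floordiv_neg_eq_iff_of_pos hstep).mpr
              ⟨by rw [show (c + 1 - 1) * step = c * step by ring, ← hc]; omega,
               by rw [show (c + 1) * step = c * step + step by ring, ← hc]; omega⟩
          rw [hq, hc]; ring_nf
        · rw [if_neg hms]

-- each tier's memory list, as a progression (kernel computation, incl. the pyRange calls)
theorem cfg512 : pyA_CONFIGS.getD 512 [] = progList 1024 1024 3 := by decide
theorem cfg1024 : pyA_CONFIGS.getD 1024 [] = progList 2048 1024 6 := by decide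
theorem cfg2048 : pyA_CONFIGS.getD 2048 [] = progList 4096 1024 12 := by decide
theorem cfg4096 : pyA_CONFIGS.getD 4096 [] = progList 8192 1024 22 := by decide
theorem cfg8192 : pyA_CONFIGS.getD 8192 [] = progList 16384 4096 11 := by decide
theorem cfg16384 : pyA_CONFIGS.getD 16384 [] = progList 32768 8192 11 := by decide

-- the 256 tier ([512, 1024, 2048]) is not one progression; handled by cases
theorem tier256 (memory : Int) (hm : memory ≤ 2048) :
    pyA_memLoop 256 (pyA_CONFIGS.getD 256 []) memory
      = (PySem.Int.toStr 256,
         PySem.Int.toStr (if memory ≤ 512 then 512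
                          else -(PySem.Int.floordiv (-memory) 1024) * 1024)) := by
  rw [show pyA_CONFIGS.getD 256 [] = [512, 1024, 2048] from by decide]
  simp only [pyA_memLoop]
  by_cases h1 : memory ≤ 512
  · rw [if_pos h1, if_pos h1]
  · rw [if_neg h1, if_neg h1]
    by_cases h2 : memory ≤ 1024
    · rw [if_pos h2]
      have hq : -(PySem.Int.floordiv (-memory) 1024) = 1 :=
        (PySem.Int.neg_floordiv_neg_eq_iff_of_pos (by norm_num)).mpr ⟨by omega, by omega⟩
      rw [hq]; norm_num
    · rw [if_neg h2, if_pos (by omega)]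
      have hq : -(PySem.Int.floordiv (-memory) 1024) = 2 :=
        (PySem.Int.neg_floordiv_neg_eq_iff_of_pos (by norm_num)).mpr ⟨by omega, by omega⟩
      rw [hq]; norm_num

-- ===== VERDICT (by name: the statement is the Claim_ definition above) =====
theorem convert_fargate_cpu_memory_py_spec : Claim_equal_convert_fargate_cpu_memory_py := by
  intro cpu memory _ hpre
  obtain ⟨h16, hm256, hm512, hm1024, hm2048, hm4096, hm8192, hm16384⟩ := hpre
  unfold Spec_convert_fargate_cpu_memory_py
  unfold convert_fargate_cpu_memory_py convert_fargate_cpu_memory_py_alt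
  rw [pyA_sorted_keys]
  simp only [altTiers, pyA_cpuLoop, altLoop]
  by_cases hc1 : cpu ≤ 256
  · rw [if_pos hc1, if_pos hc1, if_neg (by have := hm256 hc1; omega)]
    exact tier256 memory (hm256 hc1)
  rw [if_neg hc1, if_neg hc1]
  by_cases hc2 : cpu ≤ 512
  · rw [if_pos hc2, if_pos hc2, if_neg (by have := hm512 hc2; omega), cfg512]
    exact memLoop_prog 512 1024 (by norm_num) 3 1024 memory ⟨1, by norm_num⟩
      (by have := hm512 hc2; push_cast; omega)
  rw [if_neg hc2, if_neg hc2]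
  by_cases hc3 : cpu ≤ 1024
  · rw [if_pos hc3, if_pos hc3, if_neg (by have := hm1024 hc3; omega), cfg1024]
    exact memLoop_prog 1024 1024 (by norm_num) 6 2048 memory ⟨2, by norm_num⟩
      (by have := hm1024 hc3; push_cast; omega)
  rw [if_neg hc3, if_neg hc3]
  by_cases hc4 : cpu ≤ 2048
  · rw [if_pos hc4, if_pos hc4, if_neg (by have := hm2048 hc4; omega), cfg2048]
    exact memLoop_prog 2048 1024 (by norm_num) 12 4096 memory ⟨4, by norm_num⟩
      (by have := hm2048 hc4; push_cast; omega)
  rw [if_neg hc4, if_neg hc4]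
  by_cases hc5 : cpu ≤ 4096
  · rw [if_pos hc5, if_pos hc5, if_neg (by have := hm4096 hc5; omega), cfg4096]
    exact memLoop_prog 4096 1024 (by norm_num) 22 8192 memory ⟨8, by norm_num⟩
      (by have := hm4096 hc5; push_cast; omega)
  rw [if_neg hc5, if_neg hc5]
  by_cases hc6 : cpu ≤ 8192
  · rw [if_pos hc6, if_pos hc6, if_neg (by have := hm8192 hc6; omega), cfg8192]
    exact memLoop_prog 8192 4096 (by norm_num) 11 16384 memory ⟨4, by norm_num⟩
      (by have := hm8192 hc6; push_cast; omega)
  rw [if_neg hc6, if_neg hc6]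
  rw [if_pos h16, if_pos h16, if_neg (by omega), cfg16384]
  exact memLoop_prog 16384 8192 (by norm_num) 11 32768 memory ⟨4, by norm_num⟩
    (by push_cast; omega)
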